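-- pv_equiv track=rewrite | github.com/DmitryKochetkov/polyakov_py | solutions16/problem80.py | F
-- ===== SOURCE A (Python) =====
-- def F(n):
--     try:
--         if n <= 5:
--             return (True, n)
--         elif n % 3 == 0:
--             x = F(n // 3 + 2)
--             if x[0]:
--                 return (True, n + x[1])
--             else:
--                 return (False, 0)
--         else:
--             x = F(n+3)
--             if x[0]:
--                 return (True, n + x[1])
--             else:
--                 return (False, 0)
--     except RecursionError:
--         return (False, 0)
-- ===== SOURCE B (Python) =====
-- def F(n):
--     total = 0
--     while True:
--         if n <= 5:
--             return (True, total + n)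
--         elif n % 3 == 0:
--             total += n
--             n = n // 3 + 2
--         else:
--             return (False, 0)
-- ===== Notes on version B (the rewrite author's own statement) =====
-- stated objective: simpler
-- what changed: Replaced the tail recursion (whose divergent n%3!=0 path is resolved by catching RecursionError) with an explicit while loop carrying a running total, returning (False, 0) immediately on the non-divisible branch.
import Mathlib
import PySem

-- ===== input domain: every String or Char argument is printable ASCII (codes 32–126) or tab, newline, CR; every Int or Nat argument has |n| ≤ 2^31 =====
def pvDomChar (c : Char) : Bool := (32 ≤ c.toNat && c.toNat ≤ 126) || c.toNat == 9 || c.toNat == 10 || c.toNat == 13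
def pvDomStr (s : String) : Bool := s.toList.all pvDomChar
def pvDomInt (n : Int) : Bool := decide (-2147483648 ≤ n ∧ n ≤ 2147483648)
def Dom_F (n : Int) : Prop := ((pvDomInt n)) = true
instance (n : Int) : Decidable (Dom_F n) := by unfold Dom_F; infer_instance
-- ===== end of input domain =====

-- B replaces A's tail recursion (with RecursionError-resolved divergent branch) by an
-- explicit accumulator loop returning (False, 0) directly on the non-divisible branch: simpler.


-- ===== PORT A =====
-- fuel models Python's recursion limit (default 1000): at exhaustion the RecursionError is
-- caught and (False, 0) is returned — exactly the except branch of A.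
def Fgo : Nat → Int → Bool × Int
  | 0, _ => (false, 0)
  | fuel+1, n =>
    if n ≤ 5 then (true, n)
    else if PySem.Int.mod n 3 = 0 then
      let x := Fgo fuel (PySem.Int.floordiv n 3 + 2)
      if x.1 then (true, n + x.2) else (false, 0)
    else
      let x := Fgo fuel (n + 3)
      if x.1 then (true, n + x.2) else (false, 0)

def F (n : Int) : Bool × Int := Fgo 1000 n

-- ===== PORT B =====
def FaltGo (total n : Int) : Bool × Int :=
  if n ≤ 5 then (true, total + n)
  else if PySem.Int.mod n 3 = 0 then FaltGo (total + n) (PySem.Int.floordiv n 3 + 2)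
  else (false, 0)
termination_by n.toNat
decreasing_by
  rename_i h1 h2
  rw [PySem.Int.floordiv_eq_ediv_of_pos (by omega)]
  omega

def F_alt (n : Int) : Bool × Int := FaltGo 0 n

-- ===== PRECONDITION & SPEC =====
def Spec_F (n : Int) (out : Bool × Int) : Prop := out = F_alt n
instance (n : Int) (out : Bool × Int) : Decidable (Spec_F n out) := by unfold Spec_F; infer_instance

-- ===== CLAIM (what is proved, stated in full; the proofs are below) =====
def Claim_equal_F : Prop := ∀ (n : Int), Dom_F n → Spec_F n (F n)

-- ===== LEMMAS AND PROOFS =====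

-- On the non-divisible branch (n > 5, n % 3 ≠ 0) A recurses on n+3 forever; every fuel
-- level returns (false, 0).
lemma Fgo_else (fuel : Nat) : ∀ n : Int, 5 < n → PySem.Int.mod n 3 ≠ 0 → Fgo fuel n = (false, 0) := by
  induction fuel with
  | zero => intro n _ _; rfl
  | succ f ih =>
    intro n h1 h2
    have hm : PySem.Int.mod n 3 = n % 3 := PySem.Int.mod_eq_emod_of_pos (by omega)
    have hm3 : PySem.Int.mod (n + 3) 3 = (n + 3) % 3 := PySem.Int.mod_eq_emod_of_pos (by omega)
    have hx : Fgo f (n + 3) = (false, 0) := ih (n + 3) (by omega) (by rw [hm3]; rw [hm] at h2; omega)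
    simp only [Fgo, if_neg (by omega : ¬ n ≤ 5), if_neg h2, hx]
    simp

-- Main invariant: with enough fuel (fuel > k, n < 2^k), the loop with accumulator `total`
-- computes the same verdict as A's recursion, with the sum shifted by `total`.
lemma main_inv : ∀ (k : Nat) (n total : Int) (fuel : Nat), n < 2 ^ k → k < fuel →
    FaltGo total n = ((Fgo fuel n).1, if (Fgo fuel n).1 then total + (Fgo fuel n).2 else 0) := by
  intro k
  induction k with
  | zero =>
    intro n total fuel hn hf
    obtain ⟨f, rfl⟩ : ∃ f, fuel = f + 1 := ⟨fuel - 1, by omega⟩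
    have h5 : n ≤ 5 := by omega
    rw [FaltGo]
    simp [Fgo, h5]
  | succ k ih =>
    intro n total fuel hn hf
    obtain ⟨f, rfl⟩ : ∃ f, fuel = f + 1 := ⟨fuel - 1, by omega⟩
    by_cases h5 : n ≤ 5
    · rw [FaltGo]; simp [Fgo, h5]
    · push_neg at h5
      by_cases h3 : PySem.Int.mod n 3 = 0
      · have hd : PySem.Int.floordiv n 3 = n / 3 := PySem.Int.floordiv_eq_ediv_of_pos (by omega)
        by_cases hm5 : n / 3 + 2 ≤ 5
        · -- the child is a base case; unfold one step on each side
          obtain ⟨g, rfl⟩ : ∃ g, f = g + 1 := ⟨f - 1, by omega⟩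
          rw [FaltGo, if_neg (by omega : ¬ n ≤ 5), if_pos h3, hd, FaltGo, if_pos hm5]
          simp only [Fgo, if_neg (by omega : ¬ n ≤ 5), if_pos h3, hd, if_pos hm5]
          simp [Prod.ext_iff]
          omega
        · push_neg at hm5
          -- the child is ≥ 6, which forces n ≥ 12, so the argument at least halves
          have hmk : n / 3 + 2 < 2 ^ k := by
            have hpow : (2 : Int) ^ (k + 1) = 2 * 2 ^ k := by ring
            have hge1 : (1 : Int) ≤ 2 ^ k := one_le_pow₀ (by norm_num)
            rw [hpow] at hn
            omega
          have hih := ih (n / 3 + 2) (total + n) f hmk (by omega)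
          rw [FaltGo, if_neg (by omega : ¬ n ≤ 5), if_pos h3, hd, hih]
          show _ = ((Fgo (f + 1) n).1, if (Fgo (f + 1) n).1 then total + (Fgo (f + 1) n).2 else 0)
          simp only [Fgo, if_neg (by omega : ¬ n ≤ 5), if_pos h3, hd]
          cases hx : (Fgo f (n / 3 + 2)).1 <;> simp [hx, Prod.ext_iff] <;> omega
      · have hx := Fgo_else (f + 1) n h5 h3
        rw [FaltGo, if_neg (by omega : ¬ n ≤ 5), if_neg h3, hx]
        simp

-- a (false, ·) result of A always carries 0
lemma Fgo_false_snd (fuel : Nat) (n : Int) (h : (Fgo fuel n).1 = false) : Fgo fuel n = (false, 0) := by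
  cases fuel with
  | zero => rfl
  | succ f =>
    simp only [Fgo] at h ⊢
    split_ifs at h ⊢ <;> simp_all

-- ===== VERDICT (by name: the statement is the Claim_ definition above) =====
theorem F_spec : Claim_equal_F := by
  intro n hdom
  have hn : n < 2 ^ 32 := by
    simp [Dom_F, pvDomInt] at hdom
    omega
  have h := main_inv 32 n 0 1000 hn (by norm_num)
  show F n = F_alt n
  unfold F F_alt
  rw [h]
  cases hx : (Fgo 1000 n).1
  · simp [Fgo_false_snd 1000 n hx]
  · simp only [hx, if_pos rfl, zero_add]
    exact Prod.ext_iff.mpr ⟨hx, rfl⟩
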